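-- pv_equiv track=rewrite | github.com/unhaya/PyCoadLens4.2 | utils/code_extractor.py | _get_indent_level
-- ===== SOURCE A (Python) =====
-- def _get_indent_level(line):
--     """
--     行のインデントレベル（スペース/タブの数）を取得（改良版）
--
--     :param line: ソースコード行
--     :return: インデントレベル
--     """
--     if not line:
--         return 0
--
--     # スペースとタブの扱いを設定
--     tab_size = 4  # タブのスペース数を設定
--
--     indent = 0
--     for char in line:
--         if char == ' ':
--             indent += 1
--         elif char == '\t':
--             # タブを特定のスペース数として扱う
--             indent += tab_size - (indent % tab_size)
--         else:
--             break
--     return indent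
-- ===== SOURCE B (Python) =====
-- def _get_indent_level(line):
--     if not line:
--         return 0
--     expanded = line.expandtabs(4)
--     return len(expanded) - len(expanded.lstrip(' '))
-- ===== Notes on version B (the rewrite author's own statement) =====
-- stated objective: idiomatic
-- what changed: Replaces the manual per-character scan with modulo arithmetic by Python's built-in tab expansion to width 4 followed by counting the leading space characters with lstrip.
import Mathlib
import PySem

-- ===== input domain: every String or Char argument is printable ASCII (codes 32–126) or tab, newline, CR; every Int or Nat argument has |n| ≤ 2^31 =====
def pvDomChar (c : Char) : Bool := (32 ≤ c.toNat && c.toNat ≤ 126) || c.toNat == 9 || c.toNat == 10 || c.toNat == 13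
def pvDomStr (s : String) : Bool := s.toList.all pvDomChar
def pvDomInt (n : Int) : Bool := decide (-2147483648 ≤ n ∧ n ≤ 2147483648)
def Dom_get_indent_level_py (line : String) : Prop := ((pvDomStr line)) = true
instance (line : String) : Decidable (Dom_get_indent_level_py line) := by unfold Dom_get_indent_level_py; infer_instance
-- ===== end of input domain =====

-- B replaces A's manual scan (modulo arithmetic per tab) with tab expansion to
-- spaces followed by counting leading spaces; objective: idiomatic, same cost.


-- ===== PORT A =====
-- the `for char in line: … break` loop, with its accumulator `indent`
def pvALoop : List Char → Int → Int
  | [], indent => indent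
  | c :: rest, indent =>
    if c = ' ' then pvALoop rest (indent + 1)
    else if c = '\t' then pvALoop rest (indent + (4 - PySem.Int.mod indent 4))
    else indent

def get_indent_level_py (line : String) : Int :=
  if line = "" then 0 else pvALoop line.toList 0

-- ===== PORT B =====
-- hand port of Python str.expandtabs(4) (no PySem primitive): column counter
-- advances per character, a tab fills to the next multiple of 4, and the
-- column resets to 0 after '\n' and '\r' — exact for tabsize 4
def pvExpandTabs4 : List Char → Int → List Char
  | [], _ => []
  | c :: rest, col =>
    if c = '\t' then
      List.replicate (4 - PySem.Int.mod col 4).toNat ' '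
        ++ pvExpandTabs4 rest (col + (4 - PySem.Int.mod col 4))
    else if c = '\n' ∨ c = '\r' then c :: pvExpandTabs4 rest 0
    else c :: pvExpandTabs4 rest (col + 1)

-- hand port of `s.lstrip(' ')` (drops leading ' ' characters only) — exact
def pvLstripSpace (l : List Char) : List Char := l.dropWhile (· = ' ')

def get_indent_level_py_alt (line : String) : Int :=
  if line = "" then 0
  else
    let expanded := pvExpandTabs4 line.toList 0
    (expanded.length : Int) - ((pvLstripSpace expanded).length : Int)

-- ===== PRECONDITION & SPEC =====
def Spec_get_indent_level_py (line : String) (out : Int) : Prop := out = get_indent_level_py_alt line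
instance (line : String) (out : Int) : Decidable (Spec_get_indent_level_py line out) := by unfold Spec_get_indent_level_py; infer_instance

-- ===== CLAIM (what is proved, stated in full; the proofs are below) =====
def Claim_equal_get_indent_level_py : Prop := ∀ (line : String), Dom_get_indent_level_py line → Spec_get_indent_level_py line (get_indent_level_py line)

-- ===== LEMMAS AND PROOFS =====

-- number of leading spaces of the expanded line
def pvLsCount (l : List Char) : Int := (l.length : Int) - ((pvLstripSpace l).length : Int)

theorem pvLsCount_cons_space (l : List Char) : pvLsCount (' ' :: l) = 1 + pvLsCount l := by
  simp [pvLsCount, pvLstripSpace, List.dropWhile]; ring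

theorem pvLsCount_cons_nonspace {c : Char} (h : c ≠ ' ') (l : List Char) :
    pvLsCount (c :: l) = 0 := by
  simp [pvLsCount, pvLstripSpace, List.dropWhile, h]

theorem pvLsCount_replicate_space (n : ℕ) (l : List Char) :
    pvLsCount (List.replicate n ' ' ++ l) = (n : Int) + pvLsCount l := by
  induction n with
  | zero => simp
  | succ k ih =>
      rw [List.replicate_succ, List.cons_append, pvLsCount_cons_space, ih]
      push_cast; ring

theorem pvLoop_eq (l : List Char) :
    ∀ ind : Int, 0 ≤ ind → pvALoop l ind = ind + pvLsCount (pvExpandTabs4 l ind) := by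
  induction l with
  | nil => intro ind _; simp [pvALoop, pvExpandTabs4, pvLsCount, pvLstripSpace]
  | cons c rest ih =>
    intro ind hind
    by_cases hs : c = ' '
    · subst hs
      rw [show pvALoop (' ' :: rest) ind = pvALoop rest (ind + 1) from rfl]
      rw [show pvExpandTabs4 (' ' :: rest) ind = ' ' :: pvExpandTabs4 rest (ind + 1) by
        simp [pvExpandTabs4]]
      rw [pvLsCount_cons_space, ih _ (by omega)]; ring
    · by_cases ht : c = '\t'
      · subst ht
        have hmod : PySem.Int.mod ind 4 = ind % 4 := by
          simp [PySem.Int.mod, Int.fmod_eq_emod]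
        set n : Int := 4 - PySem.Int.mod ind 4 with hn
        have h04 : 1 ≤ n ∧ n ≤ 4 := by
          rw [hn, hmod]; omega
        rw [show pvALoop ('\t' :: rest) ind = pvALoop rest (ind + n) from by
          simp [pvALoop, hn]]
        rw [show pvExpandTabs4 ('\t' :: rest) ind
              = List.replicate n.toNat ' ' ++ pvExpandTabs4 rest (ind + n) from by
          simp [pvExpandTabs4, hn]]
        rw [pvLsCount_replicate_space, ih _ (by omega)]
        have : (n.toNat : Int) = n := by omega
        rw [this]; ring
      · rw [show pvALoop (c :: rest) ind = ind from by simp [pvALoop, hs, ht]]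
        have hexp : ∃ l', pvExpandTabs4 (c :: rest) ind = c :: l' := by
          by_cases hnl : c = '\n' ∨ c = '\r'
          · exact ⟨pvExpandTabs4 rest 0, by simp [pvExpandTabs4, ht, hnl]⟩
          · exact ⟨pvExpandTabs4 rest (ind + 1), by simp [pvExpandTabs4, ht, hnl]⟩
        obtain ⟨l', hl'⟩ := hexp
        rw [hl', pvLsCount_cons_nonspace hs]; ring

-- ===== VERDICT (by name: the statement is the Claim_ definition above) =====
theorem get_indent_level_py_spec : Claim_equal_get_indent_level_py := by
  intro line _
  unfold Spec_get_indent_level_py get_indent_level_py get_indent_level_py_alt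
  by_cases h : line = ""
  · simp [h]
  · simp only [h, if_false]
    have := pvLoop_eq line.toList 0 le_rfl
    simpa [pvLsCount] using this
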